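-- pv_equiv track=rewrite | github.com/emocat17/InnovTrack | Oringin_Code/twitter_download/tagdown2.py | get_heighest_video_quality
-- ===== SOURCE A (Python) =====
-- def get_heighest_video_quality(variants) -> str:
--     if len(variants) == 1:
--         return variants[0]['url']
--
--     max_bitrate = 0
--     heighest_url = None
--     for i in variants:
--         if 'bitrate' in i:
--             if int(i['bitrate']) > max_bitrate:
--                 max_bitrate = int(i['bitrate'])
--                 heighest_url = i['url']
--     return heighest_url
-- ===== SOURCE B (Python) =====
-- def get_heighest_video_quality(variants) -> str:
--     if len(variants) == 1:
--         return variants[0]['url']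
--
--     good = [v for v in variants if 'bitrate' in v and int(v['bitrate']) > 0]
--     ranked = sorted(good, key=lambda v: int(v['bitrate']), reverse=True)
--     return ranked[0]['url'] if ranked else None
-- ===== Notes on version B (the rewrite author's own statement) =====
-- stated objective: alternative
-- what changed: replaces the running-max scan with mutable (max_bitrate, heighest_url) state by filter-positive + stable descending sort + take the first element's url
import Mathlib
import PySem

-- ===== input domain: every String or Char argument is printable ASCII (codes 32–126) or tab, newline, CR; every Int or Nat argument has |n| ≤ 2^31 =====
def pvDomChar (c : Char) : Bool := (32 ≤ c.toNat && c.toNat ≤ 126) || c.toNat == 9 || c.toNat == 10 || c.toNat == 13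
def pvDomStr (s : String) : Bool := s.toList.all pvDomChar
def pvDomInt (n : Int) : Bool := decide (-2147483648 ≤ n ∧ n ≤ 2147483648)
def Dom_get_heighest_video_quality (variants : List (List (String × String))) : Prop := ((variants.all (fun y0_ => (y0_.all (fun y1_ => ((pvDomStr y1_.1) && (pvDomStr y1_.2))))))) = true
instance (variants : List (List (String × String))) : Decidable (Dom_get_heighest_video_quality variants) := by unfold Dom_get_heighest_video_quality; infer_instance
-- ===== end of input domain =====

-- B replaces A's running-max scan by filter-positive + stable descending sort + first element ("alternative", not faster).

-- ===== PORT A =====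
-- dict lookup d[k] / 'k in d' on the association-list encoding (first match); shared by both ports
def pvGet (v : List (String × String)) (k : String) : Option String :=
  (v.find? (fun p => p.1 == k)).map (·.2)

-- the body of A's for-loop: state = (max_bitrate, heighest_url)
def pvStep (s : Int × Option String) (i : List (String × String)) : Int × Option String :=
  match pvGet i "bitrate" with
  | none => s                                   -- 'bitrate' not in i
  | some bs =>
    match PySem.Int.ofStr? bs with
    | none => s                                 -- int() ValueError: excluded by Pre_
    | some b => if s.1 < b then (b, pvGet i "url") else s

def get_heighest_video_quality (variants : List (List (String × String))) : Option String :=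
  if variants.length = 1 then
    pvGet (variants.headD []) "url"             -- KeyError (none) excluded by Pre_
  else
    (variants.foldl pvStep ((0 : Int), (none : Option String))).2

-- ===== PORT B =====
-- the sort key int(v['bitrate']); the getD 0 default is never reached on the filtered list
def pvKey (v : List (String × String)) : Int :=
  ((pvGet v "bitrate").bind PySem.Int.ofStr?).getD 0

-- the filter predicate: 'bitrate' in v and int(v['bitrate']) > 0
def pvPos (v : List (String × String)) : Bool :=
  match pvGet v "bitrate" with
  | none => false
  | some bs =>
    match PySem.Int.ofStr? bs with
    | none => false                             -- int() ValueError: excluded by Pre_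
    | some b => decide (0 < b)

def get_heighest_video_quality_alt (variants : List (List (String × String))) : Option String :=
  if variants.length = 1 then
    pvGet (variants.headD []) "url"
  else
    match PySem.List.sorted (variants.filter pvPos) pvKey true with
    | [] => none
    | best :: _ => pvGet best "url"

-- ===== PRECONDITION & SPEC =====
-- Pre_ excludes exactly the inputs where A raises: a single variant without 'url' (KeyError),
-- a variant whose 'bitrate' does not parse as an int (ValueError), and a variant whose bitrate
-- strictly exceeds all earlier variants' bitrates but which lacks 'url' (KeyError mid-scan).
def Pre_get_heighest_video_quality (variants : List (List (String × String))) : Prop :=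
  if variants.length = 1 then
    (pvGet (variants.headD []) "url").isSome = true
  else
    (∀ v ∈ variants, ∀ bs, pvGet v "bitrate" = some bs → (PySem.Int.ofStr? bs).isSome = true)
    ∧ (∀ j ∈ List.range variants.length,
        (0 < pvKey variants[j]! ∧ ∀ i ∈ List.range j, pvKey variants[i]! < pvKey variants[j]!) →
        (pvGet variants[j]! "url").isSome = true)
instance (variants : List (List (String × String))) : Decidable (Pre_get_heighest_video_quality variants) := by unfold Pre_get_heighest_video_quality; infer_instance

def pvWitness_get_heighest_video_quality : (List (List (String × String))) :=
  [[("bitrate", "2"), ("url", "a")], [("bitrate", "1")]]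

def Spec_get_heighest_video_quality (variants : List (List (String × String))) (out : Option String) : Prop := out = get_heighest_video_quality_alt variants
instance (variants : List (List (String × String))) (out : Option String) : Decidable (Spec_get_heighest_video_quality variants out) := by unfold Spec_get_heighest_video_quality; infer_instance

-- ===== CLAIM (what is proved, stated in full; the proofs are below) =====
def Claim_equal_get_heighest_video_quality : Prop := ∀ (variants : List (List (String × String))), Dom_get_heighest_video_quality variants → Pre_get_heighest_video_quality variants → Spec_get_heighest_video_quality variants (get_heighest_video_quality variants)

-- ===== LEMMAS AND PROOFS =====

-- the insertion step of B's descending stable sort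
def pvIns (x : List (String × String)) (acc : List (List (String × String))) : List (List (String × String)) :=
  PySem.List.insertBy (fun a b => decide (pvKey b < pvKey a)) x acc

-- the loop invariant tying A's state to the sort accumulator: the accumulator's head carries
-- exactly A's (max_bitrate, heighest_url)
def pvRel (acc : List (List (String × String))) (s : Int × Option String) : Prop :=
  (acc = [] ∧ s = (0, none)) ∨ ∃ b t, acc = b :: t ∧ 0 < pvKey b ∧ s = (pvKey b, pvGet b "url")

lemma pvRel_fst_nonneg {acc s} (h : pvRel acc s) : 0 ≤ s.1 := by
  rcases h with ⟨_, rfl⟩ | ⟨b, t, _, hb, rfl⟩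
  · simp
  · simpa using le_of_lt hb

lemma pvStep_eq (s : Int × Option String) (x : List (String × String)) (h : 0 ≤ s.1) :
    pvStep s x = if s.1 < pvKey x then (pvKey x, pvGet x "url") else s := by
  unfold pvStep pvKey
  rcases hb : pvGet x "bitrate" with _ | bs
  · rw [if_neg (by simp; omega)]
  · rcases hp : PySem.Int.ofStr? bs with _ | b
    · simp [hp]
      intro hc
      exact absurd hc (by omega)
    · simp [hp]

lemma pvPos_iff (x : List (String × String)) : pvPos x = true ↔ 0 < pvKey x := by
  unfold pvPos pvKey
  rcases hb : pvGet x "bitrate" with _ | bs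
  · simp
  · rcases hp : PySem.Int.ofStr? bs with _ | b <;> simp [hp]

lemma pvRel_step {acc s} (x : List (String × String)) (h : pvRel acc s) :
    pvRel (if pvPos x then pvIns x acc else acc) (pvStep s x) := by
  rw [pvStep_eq s x (pvRel_fst_nonneg h)]
  by_cases hpos : pvPos x = true
  · have hkx : 0 < pvKey x := (pvPos_iff x).mp hpos
    rw [if_pos hpos]
    rcases h with ⟨rfl, rfl⟩ | ⟨b, t, rfl, hb, rfl⟩
    · rw [if_pos (by simpa using hkx)]
      exact Or.inr ⟨x, [], by simp [pvIns, PySem.List.insertBy], hkx, rfl⟩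
    · by_cases hlt : pvKey b < pvKey x
      · rw [if_pos (by simpa using hlt)]
        exact Or.inr ⟨x, b :: t, by simp [pvIns, PySem.List.insertBy, hlt], hkx, rfl⟩
      · rw [if_neg (by simpa using hlt)]
        exact Or.inr ⟨b, pvIns x t, by simp [pvIns, PySem.List.insertBy, hlt], hb, rfl⟩
  · have hkx : ¬ 0 < pvKey x := fun hc => hpos ((pvPos_iff x).mpr hc)
    have hs := pvRel_fst_nonneg h
    rw [if_neg hpos, if_neg (by omega)]
    exact h

lemma pvRel_foldl (l : List (List (String × String))) :
    ∀ acc s, pvRel acc s →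
      pvRel ((l.filter pvPos).foldl (fun a x => pvIns x a) acc) (l.foldl pvStep s) := by
  induction l with
  | nil => intro acc s h; simpa using h
  | cons x t ih =>
    intro acc s h
    have h' := pvRel_step x h
    by_cases hpos : pvPos x = true
    · simpa [List.filter_cons, hpos] using ih _ _ (by simpa [hpos] using h')
    · simpa [List.filter_cons, hpos] using ih _ _ (by simpa [hpos] using h')

-- ===== VERDICT (by name: the statement is the Claim_ definition above) =====
theorem get_heighest_video_quality_spec : Claim_equal_get_heighest_video_quality := by
  intro variants _ _
  unfold Spec_get_heighest_video_quality
  unfold get_heighest_video_quality get_heighest_video_quality_alt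
  by_cases hlen : variants.length = 1
  · simp [hlen]
  · rw [if_neg hlen, if_neg hlen]
    rw [PySem.List.sorted_rev_eq_foldl_insertBy]
    have h := pvRel_foldl variants [] (0, none) (Or.inl ⟨rfl, rfl⟩)
    rcases h with ⟨hacc, hs⟩ | ⟨b, t, hacc, _, hs⟩
    · rw [hs]
      simp only [pvIns] at hacc
      rw [hacc]
    · rw [hs]
      simp only [pvIns] at hacc
      rw [hacc]
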